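-- pv_equiv track=rewrite | github.com/SSAFYnity/Job-Preparation-Challenge-2nd | Programmers/택배배달과수거하기/택배배달과수거하기_최형오.py | solution
-- ===== SOURCE A (Python) =====
-- def solution(cap, n, deliveries, pickups):
--     answer = 0
--     deli = 0
--     pick = 0
--
--     for i in range(n-1, -1, -1):
--
--         cnt = 0
--         deli += deliveries[i]
--         pick += pickups[i]
--
--         while(deli > 0 or pick > 0 ):
--             deli -= cap
--             pick -= cap
--             cnt += 1
--
--         answer += (i+1) * 2 * cnt
--
--     return answer
-- ===== SOURCE B (Python) =====
-- def solution(cap, n, deliveries, pickups):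
--     # Far-to-near scan: cumulative sums d, p; the trucks' trips so far is the running
--     # maximum of the ceiling divisions; each position adds 2 * trips to the answer.
--     total = 0
--     d = 0
--     p = 0
--     trips = 0
--     for i in range(n - 1, -1, -1):
--         d += deliveries[i]
--         p += pickups[i]
--         trips = max(trips, -(-d // cap), -(-p // cap))
--         total += 2 * trips
--     return total
-- ===== Notes on version B (the rewrite author's own statement) =====
-- stated objective: alternative
-- what changed: Replaces the carried negative-remainder simulation (inner while loop counting trips one by one, weighted by (i+1)) with cumulative sums and a running maximum of ceiling divisions, adding 2*trips per position.
-- outside the precondition, e.g. on solution(-1, 1, [-1], [0]): A returns 0, B returns 2; on solution(0, 1, [0], [0]): A returns 0, B raises ZeroDivisionError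
import Mathlib
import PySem

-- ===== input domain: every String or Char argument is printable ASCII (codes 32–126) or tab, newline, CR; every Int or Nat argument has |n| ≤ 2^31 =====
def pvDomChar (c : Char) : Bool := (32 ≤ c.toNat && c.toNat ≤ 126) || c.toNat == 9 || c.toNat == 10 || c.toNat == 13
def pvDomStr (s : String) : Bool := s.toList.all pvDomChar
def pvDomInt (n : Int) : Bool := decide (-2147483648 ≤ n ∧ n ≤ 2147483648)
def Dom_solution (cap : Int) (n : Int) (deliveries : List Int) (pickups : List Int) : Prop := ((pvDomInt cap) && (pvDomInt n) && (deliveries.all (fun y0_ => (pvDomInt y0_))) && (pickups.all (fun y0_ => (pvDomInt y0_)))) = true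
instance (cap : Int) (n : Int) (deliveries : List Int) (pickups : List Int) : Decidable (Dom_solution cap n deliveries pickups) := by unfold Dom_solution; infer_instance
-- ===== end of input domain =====

-- B replaces A's trip-by-trip while-loop simulation (with carried negative remainders and
-- (i+1)-weighted increments) by cumulative sums and a running maximum of ceiling divisions.

-- ===== PORT A =====
-- the inner 'while deli > 0 or pick > 0' loop; fuel only makes it total (enough fuel is supplied)
def pvWhile (fuel : Nat) (cap deli pick cnt : Int) : Int × Int × Int :=
  match fuel with
  | 0 => (deli, pick, cnt)
  | f + 1 =>
    if deli > 0 || pick > 0 then pvWhile f cap (deli - cap) (pick - cap) (cnt + 1)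
    else (deli, pick, cnt)

def pvStepA (cap : Int) (deliveries pickups : List Int) (st : Int × Int × Int) (i : Int) :
    Int × Int × Int :=
  let deli := st.2.1 + PySem.List.pyGetD deliveries i 0
  let pick := st.2.2 + PySem.List.pyGetD pickups i 0
  let r := pvWhile (deli.toNat + pick.toNat) cap deli pick 0
  (st.1 + (i + 1) * 2 * r.2.2, r.1, r.2.1)

def solution (cap : Int) (n : Int) (deliveries : List Int) (pickups : List Int) : Int :=
  ((PySem.List.pyRange (n - 1) (-1) (-1)).foldl (pvStepA cap deliveries pickups) (0, 0, 0)).1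

-- ===== PORT B =====
def pvCeil (cap x : Int) : Int := -(PySem.Int.floordiv (-x) cap)

-- state (total, d, p, trips)
def pvStepB (cap : Int) (deliveries pickups : List Int) (st : Int × Int × Int × Int) (i : Int) :
    Int × Int × Int × Int :=
  let d := st.2.1 + PySem.List.pyGetD deliveries i 0
  let p := st.2.2.1 + PySem.List.pyGetD pickups i 0
  let trips := max (max st.2.2.2 (pvCeil cap d)) (pvCeil cap p)
  (st.1 + 2 * trips, d, p, trips)

def solution_alt (cap : Int) (n : Int) (deliveries : List Int) (pickups : List Int) : Int :=
  ((PySem.List.pyRange (n - 1) (-1) (-1)).foldl (pvStepB cap deliveries pickups) (0, 0, 0, 0)).1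

-- ===== PRECONDITION & SPEC =====
-- Pre_ keeps the natural domain: when the loop runs at all (n ≥ 1) it needs cap ≥ 1 (for cap ≤ 0
-- A's while loop diverges as soon as a cumulative sum is positive, and B divides by cap) and
-- n list cells on each side (Python raises IndexError otherwise).
def Pre_solution (cap : Int) (n : Int) (deliveries : List Int) (pickups : List Int) : Prop :=
  n ≤ 0 ∨ (1 ≤ cap ∧ n ≤ (deliveries.length : Int) ∧ n ≤ (pickups.length : Int))
instance (cap : Int) (n : Int) (deliveries : List Int) (pickups : List Int) : Decidable (Pre_solution cap n deliveries pickups) := by unfold Pre_solution; infer_instance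

def pvWitness_solution : Int × Int × List Int × List Int := (4, 2, [1, 0], [0, 3])

def Spec_solution (cap : Int) (n : Int) (deliveries : List Int) (pickups : List Int) (out : Int) : Prop := out = solution_alt cap n deliveries pickups
instance (cap : Int) (n : Int) (deliveries : List Int) (pickups : List Int) (out : Int) : Decidable (Spec_solution cap n deliveries pickups out) := by unfold Spec_solution; infer_instance

-- ===== CLAIM (what is proved, stated in full; the proofs are below) =====
def Claim_equal_solution : Prop := ∀ (cap : Int) (n : Int) (deliveries : List Int) (pickups : List Int), Dom_solution cap n deliveries pickups → Pre_solution cap n deliveries pickups → Spec_solution cap n deliveries pickups (solution cap n deliveries pickups)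

-- ===== LEMMAS AND PROOFS =====

-- ceiling-division bracket: pvCeil cap x is the unique q with (q-1)*cap < x ≤ q*cap
theorem pvCeil_bounds (cap x : Int) (hc : 1 ≤ cap) :
    (pvCeil cap x - 1) * cap < x ∧ x ≤ pvCeil cap x * cap := by
  exact (PySem.Int.neg_floordiv_neg_eq_iff_of_pos (a := x) (b := cap) (q := pvCeil cap x)
    (by omega)).1 rfl

theorem pvCeil_nonpos (cap x : Int) (hc : 1 ≤ cap) (hx : x ≤ 0) : pvCeil cap x ≤ 0 := by
  rcases pvCeil_bounds cap x hc with ⟨h1, _⟩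
  nlinarith

theorem pvCeil_pos (cap x : Int) (hc : 1 ≤ cap) (hx : 0 < x) : 1 ≤ pvCeil cap x := by
  rcases pvCeil_bounds cap x hc with ⟨_, h2⟩
  nlinarith

theorem pvCeil_shift (cap x t : Int) (hc : 1 ≤ cap) :
    pvCeil cap (x - cap * t) = pvCeil cap x - t := by
  rcases pvCeil_bounds cap x hc with ⟨h1, h2⟩
  refine (PySem.Int.neg_floordiv_neg_eq_iff_of_pos (by omega)).2 ?_
  constructor <;> nlinarith

-- the number of iterations A's while loop performs
def pvK (cap d p : Int) : Int := max 0 (max (pvCeil cap d) (pvCeil cap p))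

theorem pvWhile_spec (cap : Int) (hc : 1 ≤ cap) :
    ∀ (fuel : Nat) (d p cnt : Int), d.toNat + p.toNat ≤ fuel →
      pvWhile fuel cap d p cnt = (d - cap * pvK cap d p, p - cap * pvK cap d p, cnt + pvK cap d p) := by
  intro fuel
  induction fuel with
  | zero =>
    intro d p cnt h
    have hd : d ≤ 0 := by omega
    have hp : p ≤ 0 := by omega
    have hk : pvK cap d p = 0 := by
      have := pvCeil_nonpos cap d hc hd
      have := pvCeil_nonpos cap p hc hp
      unfold pvK; omega
    simp [pvWhile, hk]
  | succ f ih =>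
    intro d p cnt h
    by_cases hcond : d > 0 ∨ p > 0
    · have hk1 : 1 ≤ pvK cap d p := by
        rcases hcond with h' | h'
        · have := pvCeil_pos cap d hc h'; unfold pvK; omega
        · have := pvCeil_pos cap p hc h'; unfold pvK; omega
      have hshift : pvK cap (d - cap) (p - cap) = pvK cap d p - 1 := by
        have hd := pvCeil_shift cap d 1 hc
        have hp := pvCeil_shift cap p 1 hc
        simp only [mul_one] at hd hp
        have hd' := pvCeil_pos cap d hc
        have hp' := pvCeil_pos cap p hc
        unfold pvK at *
        rcases hcond with h' | h'
        · have := hd' h'; omega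
        · have := hp' h'; omega
      have hfuel : (d - cap).toNat + (p - cap).toNat ≤ f := by omega
      have := ih (d - cap) (p - cap) (cnt + 1) hfuel
      simp only [pvWhile,
        show (d > 0 || p > 0) = true by rcases hcond with h' | h' <;> simp [h'],
        if_true, this, hshift]
      simp only [Prod.mk.injEq]
      refine ⟨by ring, by ring, by ring⟩
    · rw [not_or] at hcond; simp only [not_lt] at hcond
      have hk : pvK cap d p = 0 := by
        have := pvCeil_nonpos cap d hc hcond.1
        have := pvCeil_nonpos cap p hc hcond.2
        unfold pvK; omega
      have hb : (d > 0 || p > 0) = false := by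
        simp only [Bool.or_eq_false_iff, decide_eq_false_iff_not]; exact ⟨by omega, by omega⟩
      simp [pvWhile, hb, hk]

-- A's while loop started at a state shifted down by cap * t catches up to the running maximum
theorem pvK_shifted (cap x y t : Int) (hc : 1 ≤ cap) (ht : 0 ≤ t) :
    pvK cap (x - cap * t) (y - cap * t) = max (max t (pvCeil cap x)) (pvCeil cap y) - t := by
  have h1 := pvCeil_shift cap x t hc
  have h2 := pvCeil_shift cap y t hc
  unfold pvK
  omega

theorem stepA_eq (cap : Int) (deliveries pickups : List Int) (hc : 1 ≤ cap)
    (ansA D P t i : Int) (ht : 0 ≤ t) :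
    pvStepA cap deliveries pickups (ansA, D - cap * t, P - cap * t) i
      = (ansA + (i + 1) * 2 *
            (max (max t (pvCeil cap (D + PySem.List.pyGetD deliveries i 0)))
              (pvCeil cap (P + PySem.List.pyGetD pickups i 0)) - t),
         (D + PySem.List.pyGetD deliveries i 0)
           - cap * max (max t (pvCeil cap (D + PySem.List.pyGetD deliveries i 0)))
              (pvCeil cap (P + PySem.List.pyGetD pickups i 0)),
         (P + PySem.List.pyGetD pickups i 0)
           - cap * max (max t (pvCeil cap (D + PySem.List.pyGetD deliveries i 0)))
              (pvCeil cap (P + PySem.List.pyGetD pickups i 0))) := by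
  have e1 : D - cap * t + PySem.List.pyGetD deliveries i 0
      = (D + PySem.List.pyGetD deliveries i 0) - cap * t := by ring
  have e2 : P - cap * t + PySem.List.pyGetD pickups i 0
      = (P + PySem.List.pyGetD pickups i 0) - cap * t := by ring
  simp only [pvStepA, e1, e2]
  rw [pvWhile_spec cap hc _ _ _ 0 le_rfl, pvK_shifted cap _ _ t hc ht]
  simp only [Prod.mk.injEq]
  refine ⟨by ring, by ring, by ring⟩

theorem foldB_first (cap : Int) (deliveries pickups : List Int) :
    ∀ (L : List Int) (a c D P T : Int),
      (L.foldl (pvStepB cap deliveries pickups) (a + c, D, P, T)).1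
        = c + (L.foldl (pvStepB cap deliveries pickups) (a, D, P, T)).1 := by
  intro L
  induction L with
  | nil => intro a c D P T; simp only [List.foldl_nil]; ring
  | cons i L ih =>
    intro a c D P T
    simp only [List.foldl_cons, pvStepB]
    rw [show a + c + 2 * max (max T (pvCeil cap (D + PySem.List.pyGetD deliveries i 0)))
          (pvCeil cap (P + PySem.List.pyGetD pickups i 0))
        = (a + 2 * max (max T (pvCeil cap (D + PySem.List.pyGetD deliveries i 0)))
          (pvCeil cap (P + PySem.List.pyGetD pickups i 0))) + c by ring]
    exact ih _ c _ _ _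

-- main loop invariant: A's carried-remainder fold vs B's cumulative-sum running-maximum fold
theorem loop_eq (cap : Int) (hc : 1 ≤ cap) (deliveries pickups : List Int) :
    ∀ (m : Nat) (ansA D P t : Int), 0 ≤ t →
      ((PySem.List.pyRange (m : Int) (-1) (-1)).foldl (pvStepA cap deliveries pickups)
          (ansA, D - cap * t, P - cap * t)).1
        = ansA + ((PySem.List.pyRange (m : Int) (-1) (-1)).foldl (pvStepB cap deliveries pickups)
          (0, D, P, t)).1 - 2 * ((m : Int) + 1) * t := by
  intro m
  induction m with
  | zero =>
    intro ansA D P t ht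
    simp only [Nat.cast_zero]
    rw [PySem.List.pyRange_neg_one_cons (by norm_num : (-1:Int) < 0),
      show (0:Int) - 1 = -1 by ring, PySem.List.pyRange_neg_one_eq_nil le_rfl]
    simp only [List.foldl_cons, List.foldl_nil]
    rw [stepA_eq cap deliveries pickups hc ansA D P t 0 ht]
    simp only [pvStepB]
    ring
  | succ k ih =>
    intro ansA D P t ht
    have hcast : ((k+1 : Nat) : Int) - 1 = (k : Int) := by push_cast; ring
    rw [PySem.List.pyRange_neg_one_cons (by omega : (-1:Int) < ((k+1 : Nat) : Int)), hcast]
    simp only [List.foldl_cons]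
    rw [stepA_eq cap deliveries pickups hc ansA D P t _ ht]
    simp only [pvStepB]
    rw [ih _ _ _ _ (by omega)]
    rw [show (0:Int) + 2 * max (max t (pvCeil cap (D + PySem.List.pyGetD deliveries (((k+1 : Nat) : Int)) 0)))
          (pvCeil cap (P + PySem.List.pyGetD pickups (((k+1 : Nat) : Int)) 0))
        = 0 + 2 * max (max t (pvCeil cap (D + PySem.List.pyGetD deliveries (((k+1 : Nat) : Int)) 0)))
          (pvCeil cap (P + PySem.List.pyGetD pickups (((k+1 : Nat) : Int)) 0)) from rfl,
      foldB_first cap deliveries pickups _ 0 _ _ _ _]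
    push_cast
    ring

-- ===== VERDICT (by name: the statement is the Claim_ definition above) =====
theorem solution_spec : Claim_equal_solution := by
  intro cap n deliveries pickups _ hpre
  unfold Spec_solution
  by_cases hn : n ≤ 0
  · simp [solution, solution_alt, PySem.List.pyRange_neg_one_eq_nil (by omega : n - 1 ≤ -1)]
  · obtain ⟨hc, -, -⟩ := hpre.resolve_left hn
    have hm : (((n - 1).toNat : Nat) : Int) = n - 1 := by omega
    have hmain := loop_eq cap hc deliveries pickups (n - 1).toNat 0 0 0 0 le_rfl
    simp only [mul_zero, sub_zero, zero_add] at hmain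
    unfold solution solution_alt
    rw [show n - 1 = (((n - 1).toNat : Nat) : Int) from hm.symm]
    rw [hmain]
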